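-- pv_equiv track=rewrite | github.com/pypi-data/pypi-mirror-397 | packages/openai-guardrails/openai_guardrails-0.2.1.tar.gz/openai_guardrails-0.2.1/src/guardrails/checks/text/secret_keys.py | _char_diversity
-- ===== SOURCE A (Python) =====
-- def _char_diversity(s: str) -> int:
--     """Count the number of character types present in a string.
--
--     Returns the sum of booleans for presence of lowercase, uppercase, digits, and specials.
--
--     Args:
--         s (str): Input string.
--
--     Returns:
--         int: Number of unique character types in the string (1-4).
--     """
--     return sum(
--         (
--             any(c.islower() for c in s),
--             any(c.isupper() for c in s),
--             any(c.isdigit() for c in s),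
--             any(not c.isalnum() for c in s),
--         )
--     )
-- ===== SOURCE B (Python) =====
-- def _char_diversity(s: str) -> int:
--     """Single pass over the characters maintaining four presence flags,
--     stopping early once all four character classes have been seen."""
--     lo = up = dg = sp = False
--     for c in s:
--         lo = lo or c.islower()
--         up = up or c.isupper()
--         dg = dg or c.isdigit()
--         sp = sp or not c.isalnum()
--         if lo and up and dg and sp:
--             break
--     return lo + up + dg + sp
-- ===== Notes on version B (the rewrite author's own statement) =====
-- stated objective: alternative
-- what changed: Replaces four separate any() scans of the string by one single pass that maintains four boolean flags and breaks early once all four classes were seen.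
import Mathlib
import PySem

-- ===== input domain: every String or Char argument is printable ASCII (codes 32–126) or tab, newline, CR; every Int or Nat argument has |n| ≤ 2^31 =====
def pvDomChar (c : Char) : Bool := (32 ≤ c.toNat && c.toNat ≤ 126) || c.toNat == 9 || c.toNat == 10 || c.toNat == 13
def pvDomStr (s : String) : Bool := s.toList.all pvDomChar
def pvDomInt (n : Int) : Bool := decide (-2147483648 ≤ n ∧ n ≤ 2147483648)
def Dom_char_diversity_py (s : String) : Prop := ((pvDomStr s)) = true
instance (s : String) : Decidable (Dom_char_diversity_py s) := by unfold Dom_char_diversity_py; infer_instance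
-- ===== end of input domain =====

-- B replaces A's four separate any() scans by one single-pass loop with four flags and early exit (alternative decomposition, same cost).


-- ===== PORT A =====
-- sum of the four any(...) scans, in order
def char_diversity_py (s : String) : Int :=
  (if s.toList.any (fun c => PySem.Chars.islower c) then (1 : Int) else 0)
  + (if s.toList.any (fun c => PySem.Chars.isupper c) then (1 : Int) else 0)
  + (if s.toList.any (fun c => PySem.Chars.isdigit c) then (1 : Int) else 0)
  + (if s.toList.any (fun c => !PySem.Chars.isalnum c) then (1 : Int) else 0)

-- ===== PORT B =====
-- the single-pass loop with four flags and early break, as in Source B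
def cdLoop : List Char → Bool → Bool → Bool → Bool → Bool × Bool × Bool × Bool
  | [], lo, up, dg, sp => (lo, up, dg, sp)
  | c :: cs, lo, up, dg, sp =>
    let lo' := lo || PySem.Chars.islower c
    let up' := up || PySem.Chars.isupper c
    let dg' := dg || PySem.Chars.isdigit c
    let sp' := sp || !PySem.Chars.isalnum c
    if lo' && up' && dg' && sp' then (lo', up', dg', sp')
    else cdLoop cs lo' up' dg' sp'

def char_diversity_py_alt (s : String) : Int :=
  let r := cdLoop s.toList false false false false
  (if r.1 then (1 : Int) else 0) + (if r.2.1 then (1 : Int) else 0)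
  + (if r.2.2.1 then (1 : Int) else 0) + (if r.2.2.2 then (1 : Int) else 0)

-- ===== PRECONDITION & SPEC =====
def Spec_char_diversity_py (s : String) (out : Int) : Prop := out = char_diversity_py_alt s
instance (s : String) (out : Int) : Decidable (Spec_char_diversity_py s out) := by unfold Spec_char_diversity_py; infer_instance

-- ===== CLAIM (what is proved, stated in full; the proofs are below) =====
def Claim_equal_char_diversity_py : Prop := ∀ (s : String), Dom_char_diversity_py s → Spec_char_diversity_py s (char_diversity_py s)

-- ===== LEMMAS AND PROOFS =====
theorem cdLoop_eq (cs : List Char) : ∀ (lo up dg sp : Bool),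
    cdLoop cs lo up dg sp =
      (lo || cs.any (fun c => PySem.Chars.islower c),
       up || cs.any (fun c => PySem.Chars.isupper c),
       dg || cs.any (fun c => PySem.Chars.isdigit c),
       sp || cs.any (fun c => !PySem.Chars.isalnum c)) := by
  induction cs with
  | nil => intro lo up dg sp; simp [cdLoop]
  | cons c cs ih =>
    intro lo up dg sp
    simp only [cdLoop, List.any_cons]
    split
    · rename_i h
      simp only [Bool.and_eq_true] at h
      obtain ⟨⟨⟨h1, h2⟩, h3⟩, h4⟩ := h
      simp [← Bool.or_assoc, h1, h2, h3, h4]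
    · rw [ih]; simp [Bool.or_assoc]

-- ===== VERDICT (by name: the statement is the Claim_ definition above) =====
theorem char_diversity_py_spec : Claim_equal_char_diversity_py := by
  intro s _
  unfold Spec_char_diversity_py char_diversity_py char_diversity_py_alt
  rw [cdLoop_eq]
  simp
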